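-- pv_equiv track=rewrite | github.com/yxyxy/HordeForge | agents/ci_failure_analyzer.py | _pick_most_severe
-- ===== SOURCE A (Python) =====
-- SEVERITY_MAP = {
--     "syntax_error": "critical",
--     "indentation_error": "critical",
--     "go_compile": "critical",
--     "java_compile": "critical",
--     "js_syntax": "critical",
--     "test_failure": "major",
--     "collection_error": "major",
--     "path_error": "major",
--     "js_type": "major",
--     "js_reference": "major",
--     "import_error": "major",
--     "type_error": "major",
--     "runtime_error": "major",
--     "go_runtime": "major",
--     "java_runtime": "major",
--     "build_failure": "major",
--     "infrastructure": "major",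
--     "go_test": "major",
--     "lint_warning": "minor",
-- }
--
-- def determine_severity(classification: str) -> str:
--     return SEVERITY_MAP.get(classification, "major")
--
-- def _pick_most_severe(classifications: list[str]) -> str:
--     priority = {"critical": 3, "major": 2, "minor": 1, "unknown": 0}
--     best = "unknown"
--     best_score = -1
--     for classification in classifications:
--         score = priority.get(determine_severity(classification), 0)
--         if score > best_score:
--             best = classification
--             best_score = score
--     return best
-- ===== SOURCE B (Python) =====
-- SEVERITY_MAP = {
--     "syntax_error": "critical",
--     "indentation_error": "critical",
--     "go_compile": "critical",
--     "java_compile": "critical",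
--     "js_syntax": "critical",
--     "test_failure": "major",
--     "collection_error": "major",
--     "path_error": "major",
--     "js_type": "major",
--     "js_reference": "major",
--     "import_error": "major",
--     "type_error": "major",
--     "runtime_error": "major",
--     "go_runtime": "major",
--     "java_runtime": "major",
--     "build_failure": "major",
--     "infrastructure": "major",
--     "go_test": "major",
--     "lint_warning": "minor",
-- }
--
-- def determine_severity(classification: str) -> str:
--     return SEVERITY_MAP.get(classification, "major")
--
-- def _pick_most_severe(classifications: list[str]) -> str:
--     # Scan severity tiers from most to least severe; within a tier the
--     # first classification in list order wins (same tie-break as a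
--     # max-tracking pass with a strict '>').
--     for tier in ("critical", "major", "minor"):
--         hit = next((c for c in classifications if determine_severity(c) == tier), None)
--         if hit is not None:
--             return hit
--     return "unknown"
-- ===== Notes on version B (the rewrite author's own statement) =====
-- stated objective: alternative
-- what changed: Replaces the single max-score-tracking fold (with a priority dict and best/best_score accumulators) by an outer loop over the three severity tiers in descending order that returns the first classification in the tier, falling back to 'unknown' on an empty list.
import Mathlib
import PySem

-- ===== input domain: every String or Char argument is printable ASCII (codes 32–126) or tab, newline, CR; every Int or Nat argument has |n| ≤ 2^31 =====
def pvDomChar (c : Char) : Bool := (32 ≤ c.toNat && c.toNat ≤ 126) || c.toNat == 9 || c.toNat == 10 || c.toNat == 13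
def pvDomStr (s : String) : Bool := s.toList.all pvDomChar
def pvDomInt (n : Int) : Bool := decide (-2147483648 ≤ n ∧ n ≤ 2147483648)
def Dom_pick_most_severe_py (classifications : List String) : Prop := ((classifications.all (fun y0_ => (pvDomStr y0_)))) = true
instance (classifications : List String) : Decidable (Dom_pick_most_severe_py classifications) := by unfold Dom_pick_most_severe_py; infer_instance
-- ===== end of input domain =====

-- B replaces A's max-score-tracking fold by a scan over the three severity tiers
-- in descending order, returning the first classification of the best tier.

-- ===== PORT A =====
-- shared module constant SEVERITY_MAP and helper determine_severity (identical in Source A and Source B)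
def severity_map : PySem.Dict String String := PySem.Dict.ofList
  [("syntax_error", "critical"), ("indentation_error", "critical"), ("go_compile", "critical"),
   ("java_compile", "critical"), ("js_syntax", "critical"), ("test_failure", "major"),
   ("collection_error", "major"), ("path_error", "major"), ("js_type", "major"),
   ("js_reference", "major"), ("import_error", "major"), ("type_error", "major"),
   ("runtime_error", "major"), ("go_runtime", "major"), ("java_runtime", "major"),
   ("build_failure", "major"), ("infrastructure", "major"), ("go_test", "major"),
   ("lint_warning", "minor")]

def determine_severity (classification : String) : String :=
  severity_map.getD classification "major"

def priority_dict : PySem.Dict String Int := PySem.Dict.ofList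
  [("critical", 3), ("major", 2), ("minor", 1), ("unknown", 0)]

def pick_most_severe_py (classifications : List String) : String :=
  (classifications.foldl
    (fun (acc : String × Int) classification =>
      let score := priority_dict.getD (determine_severity classification) 0
      if score > acc.2 then (classification, score) else acc)
    ("unknown", -1)).1

-- ===== PORT B =====
-- next((c for c in classifications if determine_severity(c) == tier), None)
def pick_tier (classifications : List String) (tier : String) : Option String :=
  classifications.find? (fun c => determine_severity c == tier)

-- the outer 'for tier in (...)' loop with its early return
def pick_loop (classifications : List String) : List String → String
  | [] => "unknown"
  | t :: ts =>
    match pick_tier classifications t with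
    | some c => c
    | none => pick_loop classifications ts

def pick_most_severe_py_alt (classifications : List String) : String :=
  pick_loop classifications ["critical", "major", "minor"]

-- ===== PRECONDITION & SPEC =====
def Spec_pick_most_severe_py (classifications : List String) (out : String) : Prop := out = pick_most_severe_py_alt classifications
instance (classifications : List String) (out : String) : Decidable (Spec_pick_most_severe_py classifications out) := by unfold Spec_pick_most_severe_py; infer_instance

-- ===== CLAIM (what is proved, stated in full; the proofs are below) =====
def Claim_equal_pick_most_severe_py : Prop := ∀ (classifications : List String), Dom_pick_most_severe_py classifications → Spec_pick_most_severe_py classifications (pick_most_severe_py classifications)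

-- ===== LEMMAS AND PROOFS =====

-- abbreviations for the proofs
def pvStep (acc : String × Int) (classification : String) : String × Int :=
  let score := priority_dict.getD (determine_severity classification) 0
  if score > acc.2 then (classification, score) else acc

theorem pvStep_eq (cs : List String) (acc : String × Int) :
    cs.foldl
      (fun (acc : String × Int) classification =>
        let score := priority_dict.getD (determine_severity classification) 0
        if score > acc.2 then (classification, score) else acc) acc
    = cs.foldl pvStep acc := rfl

theorem sev_cases (c : String) :
    determine_severity c = "critical" ∨ determine_severity c = "major" ∨
      determine_severity c = "minor" := by
  unfold determine_severity
  cases h : severity_map.get? c with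
  | none => rw [PySem.Dict.getD_eq_get?_getD, h]; simp
  | some v =>
    rw [PySem.Dict.getD_eq_get?_getD, h, Option.getD_some]
    have hm := PySem.Dict.mem_items_of_get?_eq_some _ h
    have hall : ∀ p ∈ severity_map.items,
        p.2 = "critical" ∨ p.2 = "major" ∨ p.2 = "minor" := by decide
    exact hall _ hm

theorem score_crit {c : String} (h : determine_severity c = "critical") :
    priority_dict.getD (determine_severity c) 0 = 3 := by rw [h]; decide

theorem score_major {c : String} (h : determine_severity c = "major") :
    priority_dict.getD (determine_severity c) 0 = 2 := by rw [h]; decide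

theorem score_minor {c : String} (h : determine_severity c = "minor") :
    priority_dict.getD (determine_severity c) 0 = 1 := by rw [h]; decide

theorem fold3 (cs : List String) (b : String) :
    cs.foldl pvStep (b, 3) = (b, 3) := by
  induction cs with
  | nil => rfl
  | cons c cs ih =>
    simp only [List.foldl_cons]
    have h : pvStep (b, 3) c = (b, 3) := by
      rcases sev_cases c with h | h | h
      · simp [pvStep, score_crit h]
      · simp [pvStep, score_major h]
      · simp [pvStep, score_minor h]
    rw [h, ih]

theorem fold2 (cs : List String) (b : String) :
    cs.foldl pvStep (b, 2) =
      match cs.find? (fun c => determine_severity c == "critical") with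
      | some c => (c, 3)
      | none => (b, 2) := by
  induction cs generalizing b with
  | nil => rfl
  | cons c cs ih =>
    simp only [List.foldl_cons, List.find?_cons]
    rcases sev_cases c with h | h | h
    · have : pvStep (b, 2) c = (c, 3) := by simp [pvStep, score_crit h]
      rw [this, fold3, h]; rfl
    · have : pvStep (b, 2) c = (b, 2) := by simp [pvStep, score_major h]
      rw [this, ih, h]; rfl
    · have : pvStep (b, 2) c = (b, 2) := by simp [pvStep, score_minor h]
      rw [this, ih, h]; rfl

theorem fold1 (cs : List String) (b : String) :
    cs.foldl pvStep (b, 1) =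
      match cs.find? (fun c => determine_severity c == "critical") with
      | some c => (c, 3)
      | none =>
        match cs.find? (fun c => determine_severity c == "major") with
        | some c => (c, 2)
        | none => (b, 1) := by
  induction cs generalizing b with
  | nil => rfl
  | cons c cs ih =>
    simp only [List.foldl_cons, List.find?_cons]
    rcases sev_cases c with h | h | h
    · have : pvStep (b, 1) c = (c, 3) := by simp [pvStep, score_crit h]
      rw [this, fold3, h]; rfl
    · have : pvStep (b, 1) c = (c, 2) := by simp [pvStep, score_major h]
      rw [this, fold2, h]; rfl
    · have : pvStep (b, 1) c = (b, 1) := by simp [pvStep, score_minor h]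
      rw [this, ih, h]; rfl

theorem foldm1 (cs : List String) (b : String) :
    cs.foldl pvStep (b, -1) =
      match cs.find? (fun c => determine_severity c == "critical") with
      | some c => (c, 3)
      | none =>
        match cs.find? (fun c => determine_severity c == "major") with
        | some c => (c, 2)
        | none =>
          match cs.find? (fun c => determine_severity c == "minor") with
          | some c => (c, 1)
          | none => (b, -1) := by
  induction cs generalizing b with
  | nil => rfl
  | cons c cs ih =>
    simp only [List.foldl_cons, List.find?_cons]
    rcases sev_cases c with h | h | h
    · have : pvStep (b, -1) c = (c, 3) := by simp [pvStep, score_crit h]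
      rw [this, fold3, h]; rfl
    · have : pvStep (b, -1) c = (c, 2) := by simp [pvStep, score_major h]
      rw [this, fold2, h]; rfl
    · have : pvStep (b, -1) c = (c, 1) := by simp [pvStep, score_minor h]
      rw [this, fold1, h]; rfl

-- ===== VERDICT (by name: the statement is the Claim_ definition above) =====
theorem pick_most_severe_py_spec : Claim_equal_pick_most_severe_py := by
  intro cs _
  unfold Spec_pick_most_severe_py pick_most_severe_py pick_most_severe_py_alt
  rw [pvStep_eq, foldm1]
  simp only [pick_loop, pick_tier]
  cases cs.find? (fun c => determine_severity c == "critical") <;>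
    cases cs.find? (fun c => determine_severity c == "major") <;>
      cases cs.find? (fun c => determine_severity c == "minor") <;> rfl
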